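-- pv_equiv track=rewrite | github.com/pypi-data/pypi-mirror-399 | packages/empirica/empirica-1.1.0.tar.gz/empirica-1.1.0/empirica/core/metacognitive_cascade/metacognitive_cascade.py | _classify_tool_type
-- ===== SOURCE A (Python) =====
-- def _classify_tool_type(tool_name: str) -> str:
--     """Classify tool into type for better understanding"""
--     tool_name_lower = tool_name.lower()
--
--     if any(kw in tool_name_lower for kw in ['scan', 'list', 'inventory', 'map']):
--         return 'discovery'
--     elif any(kw in tool_name_lower for kw in ['search', 'grep', 'find', 'query']):
--         return 'search'
--     elif any(kw in tool_name_lower for kw in ['read', 'view', 'inspect', 'examine']):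
--         return 'inspection'
--     elif any(kw in tool_name_lower for kw in ['analyze', 'assess', 'evaluate', 'measure']):
--         return 'analysis'
--     elif any(kw in tool_name_lower for kw in ['test', 'validate', 'verify', 'check']):
--         return 'validation'
--     else:
--         return 'general'
-- ===== SOURCE B (Python) =====
-- _CATEGORIES = ('discovery', 'search', 'inspection', 'analysis', 'validation')
-- _KEYWORD_GROUPS = (
--     ('scan', 'list', 'inventory', 'map'),
--     ('search', 'grep', 'find', 'query'),
--     ('read', 'view', 'inspect', 'examine'),
--     ('analyze', 'assess', 'evaluate', 'measure'),
--     ('test', 'validate', 'verify', 'check'),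
-- )
-- # flat keyword -> priority-rank index, built once
-- _KEYWORD_RANK = {kw: rank for rank, kws in enumerate(_KEYWORD_GROUPS) for kw in kws}
--
--
-- def _classify_tool_type(tool_name: str) -> str:
--     """Classify tool into type for better understanding"""
--     lowered = tool_name.lower()
--     ranks = [rank for kw, rank in _KEYWORD_RANK.items() if kw in lowered]
--     return _CATEGORIES[min(ranks)] if ranks else 'general'
-- ===== Notes on version B (the rewrite author's own statement) =====
-- stated objective: alternative
-- what changed: Instead of an ordered if/elif chain of per-category membership tests, B builds a flat keyword-to-priority-rank map once, collects the ranks of all matching keywords in one pass, and returns the category with the minimum rank (or 'general' if none matched).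
import Mathlib
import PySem

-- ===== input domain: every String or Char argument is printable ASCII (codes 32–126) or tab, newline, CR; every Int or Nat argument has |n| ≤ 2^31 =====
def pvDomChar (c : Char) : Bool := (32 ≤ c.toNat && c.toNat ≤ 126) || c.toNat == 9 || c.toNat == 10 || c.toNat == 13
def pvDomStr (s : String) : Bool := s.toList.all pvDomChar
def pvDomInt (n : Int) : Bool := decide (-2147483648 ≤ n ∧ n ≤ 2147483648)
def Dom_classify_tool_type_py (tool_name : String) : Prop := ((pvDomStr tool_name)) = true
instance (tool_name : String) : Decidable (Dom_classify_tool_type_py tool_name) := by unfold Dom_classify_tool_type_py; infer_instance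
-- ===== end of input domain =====

-- B replaces A's ordered if/elif chain with a flat keyword→rank map: one pass collects the ranks of all matching keywords and the minimum rank picks the category (objective: alternative; same cost).


-- ===== PORT A =====
def classify_tool_type_py (tool_name : String) : String :=
  let tool_name_lower := PySem.Str.lower tool_name
  if ["scan", "list", "inventory", "map"].any (fun kw => PySem.Str.isIn kw tool_name_lower) then
    "discovery"
  else if ["search", "grep", "find", "query"].any (fun kw => PySem.Str.isIn kw tool_name_lower) then
    "search"
  else if ["read", "view", "inspect", "examine"].any (fun kw => PySem.Str.isIn kw tool_name_lower) then
    "inspection"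
  else if ["analyze", "assess", "evaluate", "measure"].any (fun kw => PySem.Str.isIn kw tool_name_lower) then
    "analysis"
  else if ["test", "validate", "verify", "check"].any (fun kw => PySem.Str.isIn kw tool_name_lower) then
    "validation"
  else
    "general"

-- ===== PORT B =====
def pvCategories : List String := ["discovery", "search", "inspection", "analysis", "validation"]

-- the flat dict {kw: rank for rank, kws in enumerate(_KEYWORD_GROUPS) for kw in kws}
def pvKeywordRank : List (String × Nat) :=
  (["scan", "list", "inventory", "map"].map (fun kw => (kw, 0))) ++
  (["search", "grep", "find", "query"].map (fun kw => (kw, 1))) ++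
  (["read", "view", "inspect", "examine"].map (fun kw => (kw, 2))) ++
  (["analyze", "assess", "evaluate", "measure"].map (fun kw => (kw, 3))) ++
  (["test", "validate", "verify", "check"].map (fun kw => (kw, 4)))

def classify_tool_type_py_alt (tool_name : String) : String :=
  let lowered := PySem.Str.lower tool_name
  let ranks := (pvKeywordRank.filter (fun p => PySem.Str.isIn p.1 lowered)).map Prod.snd
  match ranks.min? with
  | none => "general"
  | some r => pvCategories.getD r "general"

-- ===== PRECONDITION & SPEC =====
def Spec_classify_tool_type_py (tool_name : String) (out : String) : Prop := out = classify_tool_type_py_alt tool_name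
instance (tool_name : String) (out : String) : Decidable (Spec_classify_tool_type_py tool_name out) := by unfold Spec_classify_tool_type_py; infer_instance

-- ===== CLAIM (what is proved, stated in full; the proofs are below) =====
def Claim_equal_classify_tool_type_py : Prop := ∀ (tool_name : String), Dom_classify_tool_type_py tool_name → Spec_classify_tool_type_py tool_name (classify_tool_type_py tool_name)

-- ===== LEMMAS AND PROOFS =====

-- combining Option Nat minima
def omin : Option Nat → Option Nat → Option Nat
  | none, b => b
  | some a, none => some a
  | some a, some b => some (min a b)

theorem omin_some_foldl (b : Nat) (l : List Nat) :
    some (List.foldl min b l) = omin (some b) l.min? := by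
  cases l with
  | nil => rfl
  | cons x t =>
      rw [List.min?_cons' (x := x)]
      simp only [omin, List.foldl_cons, Option.some.injEq]
      exact List.foldl_assoc

theorem min?_append (l1 l2 : List Nat) : (l1 ++ l2).min? = omin l1.min? l2.min? := by
  cases l1 with
  | nil => simp [omin]
  | cons a t =>
      rw [List.cons_append, List.min?_cons' (x := a), List.min?_cons' (x := a),
        List.foldl_append, omin_some_foldl]

theorem filt_rep (q : String → Bool) (kws : List String) (r : Nat) :
    ((kws.map (fun kw => (kw, r))).filter (fun p => q p.1)).map Prod.snd =
      List.replicate ((kws.filter q).length) r := by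
  induction kws with
  | nil => simp
  | cons k t ih =>
      by_cases hk : q k = true <;>
        simp [hk, ih, List.replicate_succ]

theorem foldl_min_replicate (m : Nat) (r : Nat) :
    List.foldl min r (List.replicate m r) = r := by
  induction m with
  | zero => rfl
  | succ n ih => simp [List.replicate_succ, ih]

theorem min?_replicate (n r : Nat) :
    (List.replicate n r).min? = if n = 0 then none else some r := by
  cases n with
  | zero => rfl
  | succ m =>
      simp only [List.replicate_succ, List.min?_cons', foldl_min_replicate]
      simp

-- one keyword group, all with the same rank r: its contribution is 'some r' iff any keyword matches
theorem group_min (q : String → Bool) (kws : List String) (r : Nat) :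
    (((kws.map (fun kw => (kw, r))).filter (fun p => q p.1)).map Prod.snd).min? =
      (if kws.any q then some r else none) := by
  rw [filt_rep, min?_replicate]
  by_cases h : kws.any q = true
  · rcases List.any_eq_true.mp h with ⟨x, hx, hq⟩
    have hne : (kws.filter q) ≠ [] := by
      intro hnil
      exact (List.filter_eq_nil_iff.mp hnil x hx) hq
    simp [h, List.length_eq_zero_iff, hne]
  · have hnil : (kws.filter q) = [] := by
      refine List.filter_eq_nil_iff.mpr ?_
      intro x hx hq
      exact h (List.any_eq_true.mpr ⟨x, hx, hq⟩)
    simp [h, hnil]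

-- ===== VERDICT (by name: the statement is the Claim_ definition above) =====
theorem classify_tool_type_py_spec : Claim_equal_classify_tool_type_py := by
  intro tool_name _
  unfold Spec_classify_tool_type_py classify_tool_type_py classify_tool_type_py_alt
  simp only [pvKeywordRank, List.filter_append, List.map_append, min?_append,
    group_min (fun kw => PySem.Str.isIn kw (PySem.Str.lower tool_name))]
  split_ifs <;> rfl
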